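-- pv_equiv track=rewrite | github.com/b17z/ethereum-mcp | src/ethereum_mcp/indexer/client_compiler.py | _get_doc_comment
-- ===== SOURCE A (Python) =====
-- def _get_doc_comment(lines: list[str], line_idx: int) -> str | None:
--     """Get doc comment ending at the given line index."""
--     doc_lines = []
--     idx = line_idx - 1
--
--     while idx >= 0:
--         line = lines[idx].strip()
--         if line.startswith("//"):
--             doc_lines.insert(0, line[2:].strip())
--             idx -= 1
--         elif line == "":
--             idx -= 1
--         else:
--             break
--
--     return "\n".join(doc_lines) if doc_lines else None
-- ===== SOURCE B (Python) =====
-- def _get_doc_comment(lines: list[str], line_idx: int) -> str | None: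
--     """Get doc comment ending at the given line index."""
--     # Pass 1: walk upward to find where the contiguous comment/blank block starts.
--     idx = line_idx - 1
--     while idx >= 0:
--         stripped = lines[idx].strip()
--         if stripped.startswith("//") or stripped == "":
--             idx -= 1
--         else:
--             break
--     start = idx + 1
--     # Pass 2: collect the comment text forward, in order (no insert(0)).
--     doc_lines = []
--     for i in range(start, line_idx):
--         stripped = lines[i].strip()
--         if stripped.startswith("//"):
--             doc_lines.append(stripped[2:].strip())
--     return "\n".join(doc_lines) if doc_lines else None
-- ===== Notes on version B (the rewrite author's own statement) =====
-- stated objective: alternative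
-- what changed: Replaces the single upward loop with insert(0) (quadratic list shifting) by a boundary-finding upward scan plus an in-order forward collection pass with append.
import Mathlib
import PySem

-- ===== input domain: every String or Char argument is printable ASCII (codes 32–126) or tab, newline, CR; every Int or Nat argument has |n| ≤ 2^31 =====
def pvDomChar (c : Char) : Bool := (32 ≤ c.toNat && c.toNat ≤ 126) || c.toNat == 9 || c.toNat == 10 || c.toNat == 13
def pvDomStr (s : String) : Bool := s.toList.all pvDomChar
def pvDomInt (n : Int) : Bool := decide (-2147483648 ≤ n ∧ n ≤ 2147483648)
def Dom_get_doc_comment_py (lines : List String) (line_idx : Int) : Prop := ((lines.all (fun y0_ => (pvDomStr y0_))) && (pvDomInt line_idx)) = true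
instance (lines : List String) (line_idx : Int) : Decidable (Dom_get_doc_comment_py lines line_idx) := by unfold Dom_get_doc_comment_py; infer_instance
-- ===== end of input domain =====

-- B replaces A's single upward loop with insert(0) by an upward boundary scan plus an
-- in-order forward collection pass with append (alternative decomposition, same result).

-- ===== PORT A =====
-- the upward while-loop of A; lines[idx] is exact inside Pre_ (idx < len there), getD "" only pads outside it
def pvALoop (lines : List String) (idx : Int) (doc : List String) : List String :=
  if _h : 0 ≤ idx then
    let line := PySem.Str.strip ((PySem.List.pyGet? lines idx).getD "")
    if PySem.Str.startswith line "//" then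
      pvALoop lines (idx - 1) (PySem.Str.strip (PySem.Str.slice line (some 2) none) :: doc)
    else if line = "" then
      pvALoop lines (idx - 1) doc
    else doc
  else doc
termination_by (idx + 1).toNat
decreasing_by all_goals omega

def get_doc_comment_py (lines : List String) (line_idx : Int) : Option String :=
  let doc := pvALoop lines (line_idx - 1) []
  if doc.isEmpty then none else some (PySem.Str.join "\n" doc)

-- ===== PORT B =====
-- pass 1 of B: walk upward while comment/blank; returns start = (final idx) + 1
def pvBStart (lines : List String) (idx : Int) : Int :=
  if _h : 0 ≤ idx then
    let stripped := PySem.Str.strip ((PySem.List.pyGet? lines idx).getD "")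
    if PySem.Str.startswith stripped "//" || stripped = "" then
      pvBStart lines (idx - 1)
    else idx + 1
  else idx + 1
termination_by (idx + 1).toNat
decreasing_by all_goals omega

def get_doc_comment_py_alt (lines : List String) (line_idx : Int) : Option String :=
  let start := pvBStart lines (line_idx - 1)
  -- pass 2 of B: forward for-loop over range(start, line_idx), appending
  let doc := (PySem.List.pyRange start line_idx 1).foldl
    (fun acc i =>
      let stripped := PySem.Str.strip ((PySem.List.pyGet? lines i).getD "")
      if PySem.Str.startswith stripped "//" then
        acc ++ [PySem.Str.strip (PySem.Str.slice stripped (some 2) none)]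
      else acc) []
  if doc.isEmpty then none else some (PySem.Str.join "\n" doc)

-- ===== PRECONDITION & SPEC =====
-- Pre_ excludes line_idx > len(lines), on which A's first access lines[line_idx-1] raises IndexError.
def Pre_get_doc_comment_py (lines : List String) (line_idx : Int) : Prop := line_idx ≤ (lines.length : Int)
instance (lines : List String) (line_idx : Int) : Decidable (Pre_get_doc_comment_py lines line_idx) := by unfold Pre_get_doc_comment_py; infer_instance
def pvWitness_get_doc_comment_py : List String × Int := (["// hello", "// world", "fn f() {}"], 2)

def Spec_get_doc_comment_py (lines : List String) (line_idx : Int) (out : Option String) : Prop := out = get_doc_comment_py_alt lines line_idx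
instance (lines : List String) (line_idx : Int) (out : Option String) : Decidable (Spec_get_doc_comment_py lines line_idx out) := by unfold Spec_get_doc_comment_py; infer_instance

-- ===== CLAIM (what is proved, stated in full; the proofs are below) =====
def Claim_equal_get_doc_comment_py : Prop := ∀ (lines : List String) (line_idx : Int), Dom_get_doc_comment_py lines line_idx → Pre_get_doc_comment_py lines line_idx → Spec_get_doc_comment_py lines line_idx (get_doc_comment_py lines line_idx)

-- ===== LEMMAS AND PROOFS =====

-- abbreviations for the per-line test and extraction both ports share
def pvIsC (lines : List String) (i : Int) : Bool :=
  PySem.Str.startswith (PySem.Str.strip ((PySem.List.pyGet? lines i).getD "")) "//"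
def pvTxt (lines : List String) (i : Int) : String :=
  PySem.Str.strip (PySem.Str.slice (PySem.Str.strip ((PySem.List.pyGet? lines i).getD "")) (some 2) none)

lemma pvBStart_le (lines : List String) (idx : Int) : pvBStart lines idx ≤ idx + 1 := by
  induction idx using pvBStart.induct lines with
  | case1 idx h line hc ih =>
    rw [pvBStart]; simp only [dif_pos h]
    rw [if_pos hc]
    omega
  | case2 idx h line hc =>
    rw [pvBStart]; simp only [dif_pos h]
    rw [if_neg hc]
  | case3 idx h =>
    rw [pvBStart]; simp [h]

lemma pvALoop_eq (lines : List String) (idx : Int) (doc : List String) :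
    pvALoop lines idx doc =
      ((PySem.List.pyRange (pvBStart lines idx) (idx + 1) 1).filter (pvIsC lines)).map (pvTxt lines) ++ doc := by
  induction idx using pvBStart.induct lines generalizing doc with
  | case1 idx h line hc ih =>
    rw [pvALoop]; simp only [dif_pos h]
    rw [pvBStart]; simp only [dif_pos h]
    rw [if_pos hc]
    have hle : pvBStart lines (idx - 1) ≤ idx := by
      have h2 := pvBStart_le lines (idx - 1)
      have h3 : idx - 1 + 1 = idx := by omega
      rw [h3] at h2; exact h2
    have hsplit : PySem.List.pyRange (pvBStart lines (idx - 1)) (idx + 1) 1 =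
        PySem.List.pyRange (pvBStart lines (idx - 1)) idx 1 ++ [idx] := by
      rw [PySem.List.pyRange_one_append (pvBStart lines (idx - 1)) idx (idx + 1) hle (by omega),
        PySem.List.pyRange_one_singleton]
    have hih : ∀ d, pvALoop lines (idx - 1) d =
        ((PySem.List.pyRange (pvBStart lines (idx - 1)) idx 1).filter (pvIsC lines)).map (pvTxt lines) ++ d := by
      intro d; rw [ih d, show idx - 1 + 1 = idx from by omega]
    rcases Bool.or_eq_true_iff.mp hc with hcom | hblank
    · rw [if_pos hcom, hih]
      rw [hsplit, List.filter_append, List.map_append]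
      have h1 : List.filter (pvIsC lines) [idx] = [idx] := by
        simp only [List.filter_cons, List.filter_nil]
        rw [if_pos (by exact hcom)]
      rw [h1]
      simp [pvTxt]
    · have hblank' : line = "" := of_decide_eq_true hblank
      have hncom : ¬ PySem.Str.startswith line "//" = true := by
        rw [hblank']; decide
      rw [if_neg hncom, if_pos hblank', hih]
      rw [hsplit, List.filter_append, List.map_append]
      have h1 : List.filter (pvIsC lines) [idx] = [] := by
        simp only [List.filter_cons, List.filter_nil]
        rw [if_neg (by exact hncom)]
      rw [h1]; simp
  | case2 idx h line hc =>
    have hc' := hc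
    simp only [Bool.or_eq_true, decide_eq_true_eq, not_or] at hc'
    rw [pvALoop]; simp only [dif_pos h]
    rw [if_neg (by exact fun hx => hc'.1 hx), if_neg (by exact fun hx => hc'.2 hx)]
    rw [pvBStart]; simp only [dif_pos h]
    rw [if_neg hc]
    rw [PySem.List.pyRange_one_eq_nil (by omega)]
    simp
  | case3 idx h =>
    rw [pvALoop, pvBStart]
    simp only [dif_neg h]
    rw [PySem.List.pyRange_one_eq_nil (by omega)]
    simp

lemma pvIsC_def (lines : List String) : pvIsC lines = fun i =>
    PySem.Str.startswith (PySem.Str.strip ((PySem.List.pyGet? lines i).getD "")) "//" := rfl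
lemma pvTxt_def (lines : List String) : pvTxt lines = fun i =>
    PySem.Str.strip (PySem.Str.slice (PySem.Str.strip ((PySem.List.pyGet? lines i).getD "")) (some 2) none) := rfl

-- ===== VERDICT (by name: the statement is the Claim_ definition above) =====
theorem get_doc_comment_py_spec : Claim_equal_get_doc_comment_py := by
  intro lines line_idx _ _
  unfold Spec_get_doc_comment_py get_doc_comment_py get_doc_comment_py_alt
  rw [pvALoop_eq]
  simp only [Int.sub_add_cancel, List.append_nil, pvIsC_def, pvTxt_def]
  simp [PySem.List.foldl_append_if]
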